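-- pv_equiv track=rewrite | github.com/AngelikiGal/Modified-PhosphoKin | Modified-PhosphoKin-LAMC1.py | find_phospho_indexes_in_a_motif
-- ===== SOURCE A (Python) =====
-- def find_phospho_indexes_in_a_motif(motif):
--     #reads a motif and finds the residues to be phosphorylated. Also converts the motif into a regular expression.
--     nl = len(motif)
--     ir = []   #array that holds the positions for the residues indicated by the motif to be phosphorylated. # list of indexes of importand residues (including phospho..) in the motif
--     aS = []   #array that holds the possible residues for each position in the protein.
--     ni = -1   #shows the current aminoacid of the aS element
--     ii = 0    #shows the current character of the input string
--     pr = []   # list of indexes of phosphorylated residues in the motif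
--
--     while ii < nl-1:  #check the whole string until one character before the last character
--         c = motif[ii]    #current character
--         cn = motif[ii+1] #next character
--
--         if (c == "["): #if "["
--             ts = c
--             c = cn
--             ii += 1
--             while c != "]":    # [pS*/pT*] #scan the string until the "]"
--                 ts += c    # save the characters before "]" into the ts string
--                 ii += 1
--                 c = motif[ii]
--             ts += c       #save the "]" into the string
--             aS.append(ts) #append it to the aS
--
--             if "*" in ts: #if "*" in the ts just move on
--                 ni += 1
--             elif ("p" in ts): #if "p" in the ts it means the position will be phosphorylated so append to pr
--                 ni += 1
--                 pr.append(ni)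
--             else:
--                 ni+=1   #just move on
--             ir.append(ni)
-- #            ni -= 1
--
--         elif (c == "p"):   #if "p" search the next character
--             if cn in "STY":  #if "S" or "T" or "Y"
--                 ni += 1
--                 ii += 1
--                 ts = c+cn   #save the characters into a ts sting
--                 ir.append(ni)  #keep it in importand residues
--                 if (ii<nl-1) and (motif[ii+1]=="*"):  #-- check if "*" which means that the residues should already be phosphoprylated for the kinase to bind, move on.
--                     ts +="*"
--                     ii +=1
--                 else:
--                     pr.append(ni)  #If not "*" then its the residue to be phosphorylated so append in pr
--                 aS.append(ts)
--         else:   #else if not "[" or  "p" then it is an amino acid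
--             ni += 1
--             if not ('X' in c):    # if it has a specific aminoacid then add it to ir
--                 ir.append(ni)
--             aS.append(c)  #just append to aS
--         ii += 1
--
--     if ii<nl:  #check the last character of the string. this condition is true if the last character is "X" or an amino acid
--         c = motif[ii]
--         aS.append(c)
--
--         if not ('X' in c):    # if it has a specific aminoacid then add it to ir
--             ni +=1
--             ir.append(ni)
--
--     #convert the array into a string for output and better handling
--     sret = ""
--     for ci in aS:
--         sret += ci
--
--     #replace certain characters of the string to convert the motif language into regular expressions.
--     sret = sret.replace("X", ".")
--     sret = sret.replace("/", ",")
--     sret = sret.replace("pS*", "S")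
--     sret = sret.replace("pT*", "T")
--     sret = sret.replace("pY*", "Y")
--     sret = sret.replace("pS", "S")
--     sret = sret.replace("pT", "T")
--     sret = sret.replace("pY", "Y")
--
--
--     if len(pr) < 1:
--         raise Exception("A motif should show at least one residue to be phosphorylated.")
--     if len(ir) < 1:
--         raise Exception("A motif should show at least one important residue for binding.")
--
--     spr = []
--     for elem in pr:
--         spr.append(str(elem))
--     sir = []
--     for elem in ir:
--         sir.append(str(elem))
--
--     return sret, spr, sir
-- ===== SOURCE B (Python) =====
-- def _units(motif):
--     # cut the motif into records (text, important?, phospho?) in one scan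
--     n = len(motif)
--     out = []
--     i = 0
--     while i < n - 1:
--         c = motif[i]
--         if c == '[':
--             j = motif.index(']', i + 1)
--             ts = motif[i:j + 1]
--             out.append((ts, True, '*' not in ts and 'p' in ts))
--             i = j + 1
--         elif c == 'p' and motif[i + 1] in 'STY':
--             if motif[i + 2:i + 3] == '*':
--                 out.append((motif[i:i + 3], True, False))
--                 i += 3
--             else:
--                 out.append((motif[i:i + 2], True, True))
--                 i += 2
--         elif c == 'p':
--             i += 1
--         else:
--             out.append((c, c != 'X', False))
--             i += 1
--     if i < n:
--         out.append((motif[i], motif[i] != 'X', False))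
--     return out
--
--
-- def find_phospho_indexes_in_a_motif(motif):
--     units = _units(motif)
--     pr = [i for i, u in enumerate(units) if u[2]]
--     ir = [i for i, u in enumerate(units) if u[1]]
--     sret = ''.join(u[0] for u in units)
--     for old, new in (('X', '.'), ('/', ','), ('pS*', 'S'), ('pT*', 'T'),
--                      ('pY*', 'Y'), ('pS', 'S'), ('pT', 'T'), ('pY', 'Y')):
--         sret = sret.replace(old, new)
--     if len(pr) < 1:
--         raise Exception("A motif should show at least one residue to be phosphorylated.")
--     if len(ir) < 1:
--         raise Exception("A motif should show at least one important residue for binding.")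
--     return sret, [str(e) for e in pr], [str(e) for e in ir]
-- ===== Notes on version B (the rewrite author's own statement) =====
-- stated objective: alternative
-- what changed: A's single index-juggling while-loop that threads the counter ni and pushes into pr/ir/aS as it walks is replaced by a scan that cuts the motif into flagged records (text, important?, phospho?) and then enumerate-style index comprehensions extracting pr and ir from the record list, with the regex built by a join plus a foldl over the replacement pairs.
import Mathlib
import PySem

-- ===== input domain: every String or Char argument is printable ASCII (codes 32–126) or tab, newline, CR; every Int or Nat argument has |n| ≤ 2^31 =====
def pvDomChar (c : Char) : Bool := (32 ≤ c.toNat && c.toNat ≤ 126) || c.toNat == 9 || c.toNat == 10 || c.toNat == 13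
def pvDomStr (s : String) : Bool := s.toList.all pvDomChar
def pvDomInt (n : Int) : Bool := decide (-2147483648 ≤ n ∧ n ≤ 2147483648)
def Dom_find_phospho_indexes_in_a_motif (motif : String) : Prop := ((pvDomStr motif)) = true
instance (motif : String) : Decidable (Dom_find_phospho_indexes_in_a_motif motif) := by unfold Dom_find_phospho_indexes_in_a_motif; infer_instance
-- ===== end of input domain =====

-- B re-implements A by a different decomposition: one scan cutting the motif into flagged records
-- (text, important?, phospho?), then enumerate-style index comprehensions over the record list;
-- same return value wherever A returns (objective: alternative).


-- ===== PORT A =====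
-- inner `while c != "]"` of A's '[' branch: collect characters until ']' (inclusive), returning the
-- accumulated ts and the index of the ']'.  When the index runs past the end Python raises
-- IndexError (outside Pre_); the port then returns (ts, cs.length).  The fuel argument only makes
-- the recursion structural; at the call's fuel (cs.length + 1) it never runs out before the scan
-- itself stops, so it changes nothing about which Python steps are taken.
def pvScanBrA (fuel : Nat) (cs : List Char) (ii : Nat) (ts : List Char) : List Char × Nat :=
  match fuel with
  | 0 => (ts, cs.length)          -- never reached at the call's fuel
  | fuel + 1 =>
    match cs[ii]? with
    | none => (ts, cs.length)     -- Python: IndexError (outside Pre_)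
    | some c =>
      if c = ']' then (ts ++ [c], ii)
      else pvScanBrA fuel cs (ii + 1) (ts ++ [c])

-- A's main `while ii < nl-1` loop, plus the trailing-character block that follows it; fuel as above.
-- A's current/next characters c = motif[ii], cn = motif[ii+1] are written inline as cs[ii],
-- cs[ii+1]; A's ts of the 'p' branch is written inline as the list it ends up being.
-- `cs[ii+2]? = some '*'` is exactly A's `(ii<nl-1) and (motif[ii+1]=="*")` after its `ii += 1`
-- (both say: index ii+2 exists and holds '*').  Python's `"*" in ts` / `"p" in ts` on the string
-- ts is the character-membership test here since the needle is a single character.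
def pvLoopA (fuel : Nat) (cs : List Char) (ii : Nat) (ni : Int) (pr ir : List Int)
    (aS : List (List Char)) : Int × List Int × List Int × List (List Char) :=
  match fuel with
  | 0 => (ni, pr, ir, aS)         -- never reached at the call's fuel
  | fuel + 1 =>
    if h1 : ii + 1 < cs.length then
      if cs[ii] = '[' then
        pvLoopA fuel cs ((pvScanBrA (cs.length + 1) cs (ii + 1) [cs[ii]]).2 + 1) (ni + 1)
          (if '*' ∈ (pvScanBrA (cs.length + 1) cs (ii + 1) [cs[ii]]).1 then pr
           else if 'p' ∈ (pvScanBrA (cs.length + 1) cs (ii + 1) [cs[ii]]).1 then pr ++ [ni + 1]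
           else pr)
          (ir ++ [ni + 1]) (aS ++ [(pvScanBrA (cs.length + 1) cs (ii + 1) [cs[ii]]).1])
      else if cs[ii] = 'p' then
        if cs[ii + 1] = 'S' ∨ cs[ii + 1] = 'T' ∨ cs[ii + 1] = 'Y' then
          if cs[ii + 2]? = some '*' then
            pvLoopA fuel cs (ii + 3) (ni + 1) pr (ir ++ [ni + 1])
              (aS ++ [[cs[ii], cs[ii + 1], '*']])
          else
            pvLoopA fuel cs (ii + 2) (ni + 1) (pr ++ [ni + 1]) (ir ++ [ni + 1])
              (aS ++ [[cs[ii], cs[ii + 1]]])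
        else pvLoopA fuel cs (ii + 1) ni pr ir aS
      else
        pvLoopA fuel cs (ii + 1) (ni + 1) pr (if cs[ii] ≠ 'X' then ir ++ [ni + 1] else ir)
          (aS ++ [[cs[ii]]])
    else if h2 : ii < cs.length then
      if cs[ii] ≠ 'X' then (ni + 1, pr, ir ++ [ni + 1], aS ++ [[cs[ii]]])
      else (ni, pr, ir, aS ++ [[cs[ii]]])
    else (ni, pr, ir, aS)

def find_phospho_indexes_in_a_motif (motif : String) : String × List String × List String :=
  let cs := motif.toList
  let r := pvLoopA (cs.length + 1) cs 0 (-1) [] [] []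
  let pr := r.2.1
  let ir := r.2.2.1
  let aS := r.2.2.2
  let s0 := aS.flatten                               -- sret built by `+=` over aS
  let s1 := PySem.Chars.replace s0 ['X'] ['.']
  let s2 := PySem.Chars.replace s1 ['/'] [',']
  let s3 := PySem.Chars.replace s2 ['p', 'S', '*'] ['S']
  let s4 := PySem.Chars.replace s3 ['p', 'T', '*'] ['T']
  let s5 := PySem.Chars.replace s4 ['p', 'Y', '*'] ['Y']
  let s6 := PySem.Chars.replace s5 ['p', 'S'] ['S']
  let s7 := PySem.Chars.replace s6 ['p', 'T'] ['T']
  let s8 := PySem.Chars.replace s7 ['p', 'Y'] ['Y']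
  if pr.length < 1 then ("", [], [])                 -- Python: raise Exception (outside Pre_)
  else if ir.length < 1 then ("", [], [])            -- Python: raise Exception (outside Pre_)
  else (String.ofList s8, pr.map PySem.Int.toStr, ir.map PySem.Int.toStr)

-- ===== PORT B =====
-- Source B's `motif.index(']', i)`: index of the first ']' at or after i (none = Python ValueError);
-- fuel only makes the recursion structural, as above.
def pvFindClose (fuel : Nat) (cs : List Char) (i : Nat) : Option Nat :=
  match fuel with
  | 0 => none                     -- never reached at the call's fuel
  | fuel + 1 =>
    match cs[i]? with
    | none => none
    | some c => if c = ']' then some i else pvFindClose fuel cs (i + 1)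

-- Source B's _units: one scan producing the records (text, important?, phospho?); fuel as above.
-- `cs[i+2]? = some '*'` is Source B's `motif[i+2:i+3] == '*'`; `'*' not in ts and 'p' in ts` becomes
-- the Bool `!ts.contains '*' && ts.contains 'p'`.  On a '[' with no later ']' Source B's .index raises
-- ValueError (outside Pre_); the port emits the partial bracket record there.
def pvUnits (fuel : Nat) (cs : List Char) (i : Nat) : List (List Char × Bool × Bool) :=
  match fuel with
  | 0 => []                       -- never reached at the call's fuel
  | fuel + 1 =>
    if h1 : i + 1 < cs.length then
      if cs[i] = '[' then
        match pvFindClose (cs.length + 1) cs (i + 1) with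
        | some j =>
          let ts := cs.extract i (j + 1)
          (ts, true, !ts.contains '*' && ts.contains 'p') :: pvUnits fuel cs (j + 1)
        | none =>                 -- Python: ValueError (outside Pre_)
          let ts := cs.extract i cs.length
          [(ts, true, !ts.contains '*' && ts.contains 'p')]
      else if cs[i] = 'p' then
        if cs[i + 1] = 'S' ∨ cs[i + 1] = 'T' ∨ cs[i + 1] = 'Y' then
          if cs[i + 2]? = some '*' then
            (cs.extract i (i + 3), true, false) :: pvUnits fuel cs (i + 3)
          else
            (cs.extract i (i + 2), true, true) :: pvUnits fuel cs (i + 2)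
        else pvUnits fuel cs (i + 1)
      else ([cs[i]], cs[i] != 'X', false) :: pvUnits fuel cs (i + 1)
    else if h2 : i < cs.length then [([cs[i]], cs[i] != 'X', false)]
    else []

-- Source B's `[i for i, u in enumerate(units) if sel(u)]`, with the running enumerate counter k
def pvSelIdx (sel : List Char × Bool × Bool → Bool) :
    List (List Char × Bool × Bool) → Int → List Int
  | [], _ => []
  | u :: rest, k => if sel u then k :: pvSelIdx sel rest (k + 1) else pvSelIdx sel rest (k + 1)

def find_phospho_indexes_in_a_motif_alt (motif : String) : String × List String × List String :=
  let us := pvUnits (motif.toList.length + 1) motif.toList 0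
  let pr := pvSelIdx (fun u => u.2.2) us 0
  let ir := pvSelIdx (fun u => u.2.1) us 0
  let sret := [(['X'], ['.']), (['/'], [',']),
               (['p', 'S', '*'], ['S']), (['p', 'T', '*'], ['T']), (['p', 'Y', '*'], ['Y']),
               (['p', 'S'], ['S']), (['p', 'T'], ['T']), (['p', 'Y'], ['Y'])].foldl
      (fun s pq => PySem.Chars.replace s pq.1 pq.2) ((us.map fun u => u.1).flatten)
  if pr.length < 1 then ("", [], [])                 -- Python: raise Exception (outside Pre_)
  else if ir.length < 1 then ("", [], [])            -- Python: raise Exception (outside Pre_)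
  else (String.ofList sret, pr.map PySem.Int.toStr, ir.map PySem.Int.toStr)

-- ===== PRECONDITION & SPEC =====
-- Pre_ excludes exactly the inputs where A raises: a scanned '[' with no later ']' (IndexError),
-- or a motif whose scan records no residue to phosphorylate (the explicit Exception; the second
-- Exception, an empty ir, can only fire when pr is empty too, so it adds no extra condition).

-- every '[' before the last position has some ']' after it
def pvBracketsClosed (cs : List Char) : Bool :=
  (List.range (cs.length - 1)).all fun i =>
    cs[i]? != some '[' || (List.range cs.length).any fun j => decide (i < j) && cs[j]? == some ']'

-- position i is reachable by A's scan: every earlier '[' is closed again strictly before i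
def pvReachable (cs : List Char) (i : Nat) : Bool :=
  (List.range i).all fun b =>
    cs[b]? != some '[' || (List.range i).any fun j => decide (b < j) && cs[j]? == some ']'

-- some reachable position before the last starts a phospho contribution: a bracket group whose
-- first ']' comes after a 'p' and contains no '*', or 'p' + S/T/Y not followed by '*'
def pvHasPhospho (cs : List Char) : Bool :=
  (List.range (cs.length - 1)).any fun i =>
    pvReachable cs i &&
      ((cs[i]? == some '[' &&
         ((List.range cs.length).any fun j =>
           decide (i < j) && cs[j]? == some ']' &&
           ((List.range j).all fun k => decide (k ≤ i) || cs[k]? != some ']') &&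
           ((List.range (j + 1)).any fun k => decide (i ≤ k) && cs[k]? == some 'p') &&
           ((List.range (j + 1)).all fun k => decide (k < i) || cs[k]? != some '*'))) ||
       (cs[i]? == some 'p' &&
         (cs[i + 1]? == some 'S' || cs[i + 1]? == some 'T' || cs[i + 1]? == some 'Y') &&
         cs[i + 2]? != some '*'))

def Pre_find_phospho_indexes_in_a_motif (motif : String) : Prop :=
  pvBracketsClosed motif.toList = true ∧ pvHasPhospho motif.toList = true
instance (motif : String) : Decidable (Pre_find_phospho_indexes_in_a_motif motif) := by
  unfold Pre_find_phospho_indexes_in_a_motif; infer_instance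

def pvWitness_find_phospho_indexes_in_a_motif : String := "pS"

def Spec_find_phospho_indexes_in_a_motif (motif : String) (out : String × List String × List String) : Prop := out = find_phospho_indexes_in_a_motif_alt motif
instance (motif : String) (out : String × List String × List String) : Decidable (Spec_find_phospho_indexes_in_a_motif motif out) := by unfold Spec_find_phospho_indexes_in_a_motif; infer_instance

-- ===== CLAIM (what is proved, stated in full; the proofs are below) =====
def Claim_equal_find_phospho_indexes_in_a_motif : Prop := ∀ (motif : String), Dom_find_phospho_indexes_in_a_motif motif → Pre_find_phospho_indexes_in_a_motif motif → Spec_find_phospho_indexes_in_a_motif motif (find_phospho_indexes_in_a_motif motif)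

-- ===== LEMMAS AND PROOFS =====

theorem pvFindClose_ge (cs : List Char) :
    ∀ fuel i j, pvFindClose fuel cs i = some j → i ≤ j := by
  intro fuel
  induction fuel with
  | zero => intro i j h; simp [pvFindClose] at h
  | succ fuel ih =>
    intro i j h
    rw [pvFindClose] at h
    cases hc : cs[i]? with
    | none => rw [hc] at h; simp at h
    | some c =>
      rw [hc] at h
      by_cases he : c = ']'
      · simp only [he, reduceIte, Option.some.injEq] at h; omega
      · simp only [he, reduceIte] at h; have := ih (i + 1) j h; omega

theorem pvExtract_cons (cs : List Char) (s e : Nat) (hs : s < cs.length) (he : s < e) :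
    cs.extract s e = cs[s] :: cs.extract (s + 1) e := by
  rw [List.extract_eq_take_drop, List.extract_eq_take_drop, List.drop_eq_getElem_cons hs]
  have h2 : e - s = (e - (s + 1)) + 1 := by omega
  rw [h2, List.take_succ_cons]

theorem pvExtract_nil (cs : List Char) (s : Nat) (hs : cs.length ≤ s) :
    cs.extract s cs.length = [] := by
  rw [List.extract_eq_take_drop, List.drop_eq_nil_of_le hs, List.take_nil]

-- bridge between A's character-accumulating bracket scan and B's index-of-']' + slice
-- (holds whenever the fuel covers the rest of the list, as it does at the call's fuel)
theorem pvScanBrA_eq (cs : List Char) :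
    ∀ fuel s ts, cs.length ≤ fuel + s →
    pvScanBrA fuel cs s ts =
      match pvFindClose fuel cs s with
      | some j => (ts ++ cs.extract s (j + 1), j)
      | none => (ts ++ cs.extract s cs.length, cs.length) := by
  intro fuel
  induction fuel with
  | zero =>
    intro s ts hle
    rw [pvScanBrA, pvFindClose]
    simp [pvExtract_nil cs s (by omega)]
  | succ fuel ih =>
    intro s ts hle
    rw [pvScanBrA, pvFindClose]
    cases hc : cs[s]? with
    | none =>
      have hs : cs.length ≤ s := by
        by_contra hlt
        simp [List.getElem?_eq_getElem (by omega : s < cs.length)] at hc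
      simp [pvExtract_nil cs s hs]
    | some c =>
      have hs : s < cs.length := by
        by_contra hge
        simp [List.getElem?_eq_none (by omega : cs.length ≤ s)] at hc
      have hcs : cs[s] = c := by
        have h' := List.getElem?_eq_getElem hs
        rw [hc] at h'; exact Option.some_inj.mp h'.symm
      by_cases he : c = ']'
      · simp only [he, reduceIte]
        have hx : cs.extract s (s + 1) = [']'] := by
          rw [pvExtract_cons cs s (s + 1) hs (by omega), hcs, he, List.extract_eq_take_drop]
          simp
        simp [hx]
      · simp only [he, reduceIte]
        rw [ih (s + 1) (ts ++ [c]) (by omega)]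
        cases hf : pvFindClose fuel cs (s + 1) with
        | some j =>
          have hj := pvFindClose_ge cs fuel (s + 1) j hf
          simp [pvExtract_cons cs s (j + 1) hs (by omega), hcs]
        | none =>
          simp [pvExtract_cons cs s cs.length hs (by omega), hcs]

-- shift of the enumerate counter
theorem pvMap_add_add (xs : List Int) (a b : Int) :
    (xs.map (· + a)).map (· + b) = xs.map (· + (a + b)) := by
  rw [List.map_map]
  exact List.map_congr_left fun x _ => by simp [Function.comp]; ring

theorem pvSelIdx_shift (sel : List Char × Bool × Bool → Bool) :
    ∀ us k, pvSelIdx sel us k = (pvSelIdx sel us 0).map (· + k) := by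
  intro us
  induction us with
  | nil => intro k; simp [pvSelIdx]
  | cons u rest ih =>
    intro k
    simp only [pvSelIdx]
    rw [ih (k + 1), ih (0 + 1)]
    split_ifs
    · rw [List.map_cons, pvMap_add_add]
      refine congrArg₂ List.cons (by ring) ?_
      exact List.map_congr_left fun x _ => by ring
    · rw [pvMap_add_add]
      exact List.map_congr_left fun x _ => by ring

theorem pvSelIdx_cons (sel : List Char × Bool × Bool → Bool) (u : List Char × Bool × Bool)
    (rest : List (List Char × Bool × Bool)) :
    pvSelIdx sel (u :: rest) 0 =
      (if sel u then [(0 : Int)] else []) ++ (pvSelIdx sel rest 0).map (· + 1) := by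
  simp only [pvSelIdx]
  rw [pvSelIdx_shift sel rest (0 + 1)]
  split_ifs <;> simp

-- branch flag of a bracket record: A's if-chain over pr equals appending B's flagged index
theorem pvBrFlag (ts : List Char) (pr : List Int) (k : Int) :
    (if '*' ∈ ts then pr else if 'p' ∈ ts then pr ++ [k] else pr)
      = pr ++ (if (!ts.contains '*' && ts.contains 'p') then [k] else []) := by
  by_cases h1 : '*' ∈ ts <;> by_cases h2 : 'p' ∈ ts <;> simp [h1, h2]

-- peeling one record off B's enumerate-selection, shifting the remaining indexes
theorem pvSel_step (sel : List Char × Bool × Bool → Bool) (u : List Char × Bool × Bool)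
    (rest : List (List Char × Bool × Bool)) (pr : List Int) (k : Int) :
    pr ++ (pvSelIdx sel (u :: rest) 0).map (· + k)
      = (pr ++ (if sel u then [k] else [])) ++ (pvSelIdx sel rest 0).map (· + (k + 1)) := by
  rw [pvSelIdx_cons, List.append_assoc]
  congr 1
  rw [List.map_append, pvMap_add_add]
  congr 1
  · split_ifs <;> simp
  · exact List.map_congr_left fun x _ => by ring

-- unfold lemmas for pvUnits at nonzero fuel, one per branch
theorem pvUnits_br {cs : List Char} {fuel i : Nat} (h1 : i + 1 < cs.length)
    (hbr : cs[i] = '[') :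
    pvUnits (fuel + 1) cs i =
      match pvFindClose (cs.length + 1) cs (i + 1) with
      | some j =>
        (cs.extract i (j + 1), true,
          !(cs.extract i (j + 1)).contains '*' && (cs.extract i (j + 1)).contains 'p') ::
          pvUnits fuel cs (j + 1)
      | none =>
        [(cs.extract i cs.length, true,
          !(cs.extract i cs.length).contains '*' && (cs.extract i cs.length).contains 'p')] := by
  rw [pvUnits, dif_pos h1]
  simp only [hbr, reduceIte]

theorem pvUnits_pp_star {cs : List Char} {fuel i : Nat} (h1 : i + 1 < cs.length)
    (hnb : ¬cs[i] = '[') (hp : cs[i] = 'p')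
    (hsty : cs[i + 1] = 'S' ∨ cs[i + 1] = 'T' ∨ cs[i + 1] = 'Y')
    (hst : cs[i + 2]? = some '*') :
    pvUnits (fuel + 1) cs i = (cs.extract i (i + 3), true, false) :: pvUnits fuel cs (i + 3) := by
  rw [pvUnits, dif_pos h1, if_neg hnb, if_pos hp, if_pos hsty, if_pos hst]

theorem pvUnits_pp {cs : List Char} {fuel i : Nat} (h1 : i + 1 < cs.length)
    (hnb : ¬cs[i] = '[') (hp : cs[i] = 'p')
    (hsty : cs[i + 1] = 'S' ∨ cs[i + 1] = 'T' ∨ cs[i + 1] = 'Y')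
    (hst : ¬cs[i + 2]? = some '*') :
    pvUnits (fuel + 1) cs i = (cs.extract i (i + 2), true, true) :: pvUnits fuel cs (i + 2) := by
  rw [pvUnits, dif_pos h1, if_neg hnb, if_pos hp, if_pos hsty, if_neg hst]

theorem pvUnits_skip {cs : List Char} {fuel i : Nat} (h1 : i + 1 < cs.length)
    (hnb : ¬cs[i] = '[') (hp : cs[i] = 'p')
    (hsty : ¬(cs[i + 1] = 'S' ∨ cs[i + 1] = 'T' ∨ cs[i + 1] = 'Y')) :
    pvUnits (fuel + 1) cs i = pvUnits fuel cs (i + 1) := by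
  rw [pvUnits, dif_pos h1, if_neg hnb, if_pos hp, if_neg hsty]

theorem pvUnits_ch {cs : List Char} {fuel i : Nat} (h1 : i + 1 < cs.length)
    (hnb : ¬cs[i] = '[') (hnp : ¬cs[i] = 'p') :
    pvUnits (fuel + 1) cs i = ([cs[i]], cs[i] != 'X', false) :: pvUnits fuel cs (i + 1) := by
  rw [pvUnits, dif_pos h1, if_neg hnb, if_neg hnp]

theorem pvUnits_last {cs : List Char} {fuel i : Nat} (h1 : ¬i + 1 < cs.length)
    (h2 : i < cs.length) : pvUnits (fuel + 1) cs i = [([cs[i]], cs[i] != 'X', false)] := by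
  rw [pvUnits, dif_neg h1, dif_pos h2]

theorem pvUnits_nil {cs : List Char} {fuel i : Nat} (h1 : ¬i + 1 < cs.length)
    (h2 : ¬i < cs.length) : pvUnits fuel cs i = [] := by
  cases fuel with
  | zero => rfl
  | succ fuel => rw [pvUnits, dif_neg h1, dif_neg h2]

-- the slices B stores for a 'p'+S/T/Y record are exactly the character lists A stores
theorem pvExtract_two (cs : List Char) (i : Nat) (h : i + 1 < cs.length) :
    cs.extract i (i + 2) = [cs[i], cs[i + 1]] := by
  rw [pvExtract_cons cs i (i + 2) (by omega) (by omega),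
    pvExtract_cons cs (i + 1) (i + 2) (by omega) (by omega)]
  simp [List.extract_eq_take_drop]

theorem pvExtract_three (cs : List Char) (i : Nat) (h : i + 2 < cs.length) :
    cs.extract i (i + 3) = [cs[i], cs[i + 1], cs[i + 2]] := by
  rw [pvExtract_cons cs i (i + 3) (by omega) (by omega),
    pvExtract_cons cs (i + 1) (i + 3) (by omega) (by omega),
    pvExtract_cons cs (i + 2) (i + 3) (by omega) (by omega)]
  simp [List.extract_eq_take_drop]

-- the core equivalence: A's index-walking loop computes, beyond its incoming state, exactly B's
-- record list with enumerate-selected indexes shifted by ni + 1 (at every shared fuel; both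
-- wrappers use fuel cs.length + 1)
theorem pvLoopA_eq_units (cs : List Char) :
    ∀ fuel ii ni pr ir aS,
    (pvLoopA fuel cs ii ni pr ir aS).2 =
      (pr ++ (pvSelIdx (fun u => u.2.2) (pvUnits fuel cs ii) 0).map (· + (ni + 1)),
       ir ++ (pvSelIdx (fun u => u.2.1) (pvUnits fuel cs ii) 0).map (· + (ni + 1)),
       aS ++ (pvUnits fuel cs ii).map fun u => u.1) := by
  intro fuel
  induction fuel with
  | zero => intro ii ni pr ir aS; simp [pvLoopA, pvUnits, pvSelIdx]
  | succ fuel ih =>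
    intro ii ni pr ir aS
    rw [pvLoopA]
    by_cases h1 : ii + 1 < cs.length
    · rw [dif_pos h1]
      have hii : ii < cs.length := by omega
      by_cases hbr : cs[ii] = '['
      · -- '[' branch
        rw [if_pos hbr, pvUnits_br h1 hbr,
          pvScanBrA_eq cs (cs.length + 1) (ii + 1) [cs[ii]] (by omega)]
        cases hf : pvFindClose (cs.length + 1) cs (ii + 1) with
        | some j =>
          have hj := pvFindClose_ge cs (cs.length + 1) (ii + 1) j hf
          have hts : [cs[ii]] ++ cs.extract (ii + 1) (j + 1) = cs.extract ii (j + 1) := by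
            rw [pvExtract_cons cs ii (j + 1) hii (by omega), hbr]; simp
          simp only [hts, ih]
          rw [pvSel_step, pvSel_step, pvBrFlag]
          simp
        | none =>
          have hts : [cs[ii]] ++ cs.extract (ii + 1) cs.length = cs.extract ii cs.length := by
            rw [pvExtract_cons cs ii cs.length hii (by omega), hbr]; simp
          simp only [hts, ih]
          rw [pvUnits_nil (fuel := fuel) (by omega) (by omega)]
          rw [pvSel_step, pvSel_step, pvBrFlag]
          simp [pvSelIdx]
      · rw [if_neg hbr]
        by_cases hp : cs[ii] = 'p'
        · rw [if_pos hp]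
          by_cases hsty : cs[ii + 1] = 'S' ∨ cs[ii + 1] = 'T' ∨ cs[ii + 1] = 'Y'
          · rw [if_pos hsty]
            by_cases hst : cs[ii + 2]? = some '*'
            · -- 'p' + S/T/Y + '*'
              have h2 : ii + 2 < cs.length := by
                by_contra hge
                simp [List.getElem?_eq_none (by omega : cs.length ≤ ii + 2)] at hst
              have hstar : cs[ii + 2] = '*' := by
                have h' := List.getElem?_eq_getElem h2
                rw [hst] at h'; exact Option.some_inj.mp h'.symm
              rw [if_pos hst, ih, pvUnits_pp_star h1 hbr hp hsty hst,
                pvExtract_three cs ii h2, hstar, hp]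
              rw [pvSel_step, pvSel_step]
              simp
            · -- 'p' + S/T/Y, no '*'
              rw [if_neg hst, ih, pvUnits_pp h1 hbr hp hsty hst, pvExtract_two cs ii h1, hp]
              rw [pvSel_step, pvSel_step]
              simp
          · -- 'p' not followed by S/T/Y: both sides skip the character
            rw [if_neg hsty, ih, pvUnits_skip h1 hbr hp hsty]
        · -- plain amino-acid character
          rw [if_neg hp, ih, pvUnits_ch h1 hbr hp]
          rw [pvSel_step, pvSel_step]
          by_cases hx : cs[ii] = 'X' <;> simp [hx]
    · rw [dif_neg h1]
      by_cases h2 : ii < cs.length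
      · -- trailing character
        rw [dif_pos h2, pvUnits_last (fuel := fuel) h1 h2]
        by_cases hx : cs[ii] = 'X' <;> simp [hx, pvSelIdx]
      · rw [dif_neg h2, pvUnits_nil (fuel := fuel + 1) h1 h2]
        simp [pvSelIdx]

-- B's foldl over the eight literal replacement pairs, unfolded to A's chain of replace calls
theorem pvReplaceFold (s : List Char) :
    [(['X'], ['.']), (['/'], [',']),
     (['p', 'S', '*'], ['S']), (['p', 'T', '*'], ['T']), (['p', 'Y', '*'], ['Y']),
     (['p', 'S'], ['S']), (['p', 'T'], ['T']), (['p', 'Y'], ['Y'])].foldl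
      (fun s pq => PySem.Chars.replace s pq.1 pq.2) s =
      PySem.Chars.replace (PySem.Chars.replace (PySem.Chars.replace (PySem.Chars.replace
        (PySem.Chars.replace (PySem.Chars.replace (PySem.Chars.replace (PySem.Chars.replace
          s ['X'] ['.']) ['/'] [',']) ['p', 'S', '*'] ['S']) ['p', 'T', '*'] ['T'])
          ['p', 'Y', '*'] ['Y']) ['p', 'S'] ['S']) ['p', 'T'] ['T']) ['p', 'Y'] ['Y'] := by
  simp only [List.foldl_cons, List.foldl_nil]

-- pvLoopA_eq_units at the wrappers' initial state
theorem pvLoopA_top (cs : List Char) :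
    (pvLoopA (cs.length + 1) cs 0 (-1) [] [] []).2 =
      (pvSelIdx (fun u => u.2.2) (pvUnits (cs.length + 1) cs 0) 0,
       pvSelIdx (fun u => u.2.1) (pvUnits (cs.length + 1) cs 0) 0,
       (pvUnits (cs.length + 1) cs 0).map fun u => u.1) := by
  rw [pvLoopA_eq_units cs (cs.length + 1) 0 (-1) [] [] []]
  simp

-- ===== VERDICT (by name: the statement is the Claim_ definition above) =====
theorem find_phospho_indexes_in_a_motif_spec : Claim_equal_find_phospho_indexes_in_a_motif := by
  intro motif _ _
  show find_phospho_indexes_in_a_motif motif = find_phospho_indexes_in_a_motif_alt motif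
  unfold find_phospho_indexes_in_a_motif find_phospho_indexes_in_a_motif_alt
  simp only []
  rw [pvLoopA_top motif.toList]
  dsimp only
  rw [pvReplaceFold]
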